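-- pv_equiv track=rewrite | github.com/trentshapiro/Advent | advent_2020/Day17/day17_code.py | expand_space_4d
-- ===== SOURCE A (Python) =====
-- def expand_space_4d(input_n):
--     output_n = []
--     for space in input_n:
--         output_space = []
--         for slice in space:
--             new_rows = []
--             for row in slice:
--                 new_row = [0]+row+[0]
--                 new_rows.append(new_row)
--
--             new_slice_pad = [0 for i in range(0, len(new_rows[0]))]
--             new_slice = [new_slice_pad] + new_rows + [new_slice_pad]
--             output_space.append(new_slice)
--
--         space_expansion = [[0 for i in range(0,len(output_space[0][0]))]
--                               for j in range(0,len(output_space[0]))]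
--         output_n.append([space_expansion] + output_space + [space_expansion])
--
--     output_n_expansion = [[[0 for i in range(0,len(output_n[0][0][0]))]
--                               for j in range(0,len(output_n[0][0]))]
--                               for k in range(0,len(output_n[0]))]
--
--     output_n = [output_n_expansion] + output_n + [output_n_expansion]
--     return output_n
-- ===== SOURCE B (Python) =====
-- def expand_space_4d(input_n):
--     return _pad(input_n, 4)
--
-- def _pad(x, depth):
--     if depth == 1:
--         return [0] + x + [0]
--     padded = [_pad(child, depth - 1) for child in x]
--     frame = _zeros_like(padded[0], depth - 1)
--     return [frame] + padded + [frame]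
--
-- def _zeros_like(y, depth):
--     if depth == 1:
--         return [0] * len(y)
--     return [_zeros_like(y[0], depth - 1) for _ in y]
-- ===== Notes on version B (the rewrite author's own statement) =====
-- stated objective: simpler
-- what changed: Replaces A's four hand-written nested append loops and three ad-hoc comprehension-built zero padders with one recursive scheme: pad each child, then frame the result with a zeros-like copy of the first padded child.
-- outside the precondition, e.g. on expand_space_4d([[[]]]): A raises IndexError, B raises IndexError
import Mathlib
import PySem

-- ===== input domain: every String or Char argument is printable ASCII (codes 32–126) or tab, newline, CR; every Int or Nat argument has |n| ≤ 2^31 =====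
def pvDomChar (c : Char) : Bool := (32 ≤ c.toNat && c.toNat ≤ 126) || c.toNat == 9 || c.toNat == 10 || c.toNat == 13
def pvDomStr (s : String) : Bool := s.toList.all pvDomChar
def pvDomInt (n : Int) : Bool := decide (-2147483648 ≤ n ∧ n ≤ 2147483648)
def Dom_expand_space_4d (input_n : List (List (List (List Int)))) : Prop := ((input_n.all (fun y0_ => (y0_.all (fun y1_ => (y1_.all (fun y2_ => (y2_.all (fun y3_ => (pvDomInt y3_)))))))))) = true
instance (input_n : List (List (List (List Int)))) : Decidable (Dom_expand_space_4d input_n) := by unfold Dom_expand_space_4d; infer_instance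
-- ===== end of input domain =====

-- B pads by dimension via one recursive scheme (pad children, then add a zeros-like frame
-- built from the first padded child) instead of A's four hand-written nested loops; objective: simpler.

-- ===== PORT A =====
-- literal transliteration of A; append-accumulating loops become foldl with list append.
-- Python raises IndexError at xs[0] on an empty xs; those inputs are excluded by Pre_ below,
-- and the port reads xs.headD [] there (value outside Pre_ is not claimed).
def expand_space_4d (input_n : List (List (List (List Int)))) : List (List (List (List Int))) :=
  let output_n :=
    input_n.foldl (fun output_n space =>
      let output_space :=
        space.foldl (fun output_space slice =>
          let new_rows :=
            slice.foldl (fun new_rows row => new_rows ++ [[(0:Int)] ++ row ++ [(0:Int)]]) []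
          let new_slice_pad := List.replicate (new_rows.headD []).length (0:Int)
          let new_slice := [new_slice_pad] ++ new_rows ++ [new_slice_pad]
          output_space ++ [new_slice]) []
      let space_expansion :=
        List.replicate (output_space.headD []).length
          (List.replicate ((output_space.headD []).headD []).length (0:Int))
      output_n ++ [[space_expansion] ++ output_space ++ [space_expansion]]) []
  let output_n_expansion :=
    List.replicate (output_n.headD []).length
      (List.replicate ((output_n.headD []).headD []).length
        (List.replicate (((output_n.headD []).headD []).headD []).length (0:Int)))
  [output_n_expansion] ++ output_n ++ [output_n_expansion]

-- ===== PORT B =====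
-- B's depth-counted recursion changes type per depth, so it is transcribed as one helper per depth,
-- each the body of Source B's _zeros_like / _pad at that depth ([0]*len(y) is List.replicate).
def pvZeros1 (y : List Int) : List Int := List.replicate y.length 0

def pvZeros2 (y : List (List Int)) : List (List Int) :=
  y.map (fun _ => pvZeros1 (y.headD []))

def pvZeros3 (y : List (List (List Int))) : List (List (List Int)) :=
  y.map (fun _ => pvZeros2 (y.headD []))

def pvPad1 (x : List Int) : List Int := [0] ++ x ++ [0]

def pvPad2 (x : List (List Int)) : List (List Int) :=
  let padded := x.map pvPad1
  let frame := pvZeros1 (padded.headD [])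
  [frame] ++ padded ++ [frame]

def pvPad3 (x : List (List (List Int))) : List (List (List Int)) :=
  let padded := x.map pvPad2
  let frame := pvZeros2 (padded.headD [])
  [frame] ++ padded ++ [frame]

def expand_space_4d_alt (input_n : List (List (List (List Int)))) : List (List (List (List Int))) :=
  let padded := input_n.map pvPad3
  let frame := pvZeros3 (padded.headD [])
  [frame] ++ padded ++ [frame]

-- ===== PRECONDITION & SPEC =====
-- Pre_ excludes exactly the inputs on which Python A raises IndexError (an empty grid, an
-- empty 3-D space, or an empty 2-D slice: A indexes [0] into the freshly built list there).
def Pre_expand_space_4d (input_n : List (List (List (List Int)))) : Prop :=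
  input_n ≠ [] ∧ ∀ space ∈ input_n, space ≠ [] ∧ ∀ slice ∈ space, slice ≠ []

instance (input_n : List (List (List (List Int)))) : Decidable (Pre_expand_space_4d input_n) := by
  unfold Pre_expand_space_4d; infer_instance

def pvWitness_expand_space_4d : List (List (List (List Int))) := [[[[1, 2], [3]]]]

def Spec_expand_space_4d (input_n : List (List (List (List Int)))) (out : List (List (List (List Int)))) : Prop := out = expand_space_4d_alt input_n
instance (input_n : List (List (List (List Int)))) (out : List (List (List (List Int)))) : Decidable (Spec_expand_space_4d input_n out) := by unfold Spec_expand_space_4d; infer_instance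

-- ===== CLAIM (what is proved, stated in full; the proofs are below) =====
def Claim_equal_expand_space_4d : Prop := ∀ (input_n : List (List (List (List Int)))), Dom_expand_space_4d input_n → Pre_expand_space_4d input_n → Spec_expand_space_4d input_n (expand_space_4d input_n)

-- ===== LEMMAS AND PROOFS =====
theorem pvFoldl_snoc {α β : Type} (f : α → β) (l : List α) (a : List β) :
    List.foldl (fun acc x => acc ++ [f x]) a l = a ++ l.map f := by
  induction l generalizing a with
  | nil => simp
  | cons x xs ih => simp [ih]

theorem expand_space_4d_eq (input_n : List (List (List (List Int)))) :
    expand_space_4d input_n = expand_space_4d_alt input_n := by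
  have hz2 : ∀ (y : List (List Int)),
      List.replicate y.length (List.replicate (y.headD []).length (0:Int)) = pvZeros2 y := by
    intro y; simp [pvZeros2, pvZeros1, List.map_const']
  have hz3 : ∀ (y : List (List (List Int))),
      List.replicate y.length
        (List.replicate (y.headD []).length
          (List.replicate ((y.headD []).headD []).length (0:Int))) = pvZeros3 y := by
    intro y
    simp only [pvZeros3]
    rw [← hz2 (y.headD [])]
    simp [List.map_const']
  have h2 : ∀ (slice : List (List Int)),
      (let new_rows := slice.map (fun row => [(0:Int)] ++ row ++ [(0:Int)])
       let new_slice_pad := List.replicate (new_rows.headD []).length (0:Int)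
       [new_slice_pad] ++ new_rows ++ [new_slice_pad]) = pvPad2 slice := by
    intro slice; cases slice <;> simp [pvPad2, pvPad1, pvZeros1]
  have h3 : ∀ (space : List (List (List Int))),
      (let output_space := space.map pvPad2
       let space_expansion :=
         List.replicate (output_space.headD []).length
           (List.replicate ((output_space.headD []).headD []).length (0:Int))
       [space_expansion] ++ output_space ++ [space_expansion]) = pvPad3 space := by
    intro space; simp only [pvPad3]; rw [hz2]
  simp only [expand_space_4d, expand_space_4d_alt, pvFoldl_snoc, List.nil_append]
  simp only [h2, h3, hz3]

-- ===== VERDICT (by name: the statement is the Claim_ definition above) =====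
theorem expand_space_4d_spec : Claim_equal_expand_space_4d := by
  intro input_n _ _
  unfold Spec_expand_space_4d
  exact expand_space_4d_eq input_n
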